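-- pv_equiv track=rewrite | github.com/PalampurRockstar/Algorithm | src/main/python/algo/easy/PrintAllStairPath.py | findByTabulation
-- ===== SOURCE A (Python) =====
-- def findByTabulation(n):
--     if n == 0: return 0
--     result = [0] * (n + 1)
--     result[0] = 1
--     for i in range(1, n + 1):
--         sum = 0
--         for j in range(1, 4):
--             index = i - j
--             sum += result[index] if index > -1 else 0
--         result[i] = sum
--     return result[n]
-- ===== SOURCE B (Python) =====
-- def findByTabulation(n):
--     # O(log n): binary exponentiation of the tribonacci step matrix
--     if n == 0:
--         return 0
--     def mul(X, Y):
--         return tuple(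
--             tuple(sum(X[i][k] * Y[k][j] for k in range(3)) for j in range(3))
--             for i in range(3)
--         )
--     M = ((1, 1, 1), (1, 0, 0), (0, 1, 0))
--     R = ((1, 0, 0), (0, 1, 0), (0, 0, 1))
--     e = n
--     while e > 0:
--         if e % 2 == 1:
--             R = mul(R, M)
--         M = mul(M, M)
--         e //= 2
--     return R[0][0]
-- ===== Notes on version B (the rewrite author's own statement) =====
-- stated objective: faster
-- what changed: Replaces A's O(n) dynamic-programming table of all stair counts by binary exponentiation of the 3x3 tribonacci step matrix, keeping the special case that 0 stairs yields 0.
import Mathlib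
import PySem

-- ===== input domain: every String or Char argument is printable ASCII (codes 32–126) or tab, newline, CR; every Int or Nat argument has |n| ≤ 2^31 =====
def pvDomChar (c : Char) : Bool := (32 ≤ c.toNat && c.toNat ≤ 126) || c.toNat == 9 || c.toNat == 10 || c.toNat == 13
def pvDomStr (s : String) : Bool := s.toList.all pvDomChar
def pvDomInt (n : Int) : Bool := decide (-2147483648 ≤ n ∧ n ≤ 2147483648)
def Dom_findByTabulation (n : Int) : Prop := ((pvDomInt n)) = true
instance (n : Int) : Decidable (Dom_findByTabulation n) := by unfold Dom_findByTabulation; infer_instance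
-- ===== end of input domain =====

-- B replaces A's O(n) tabulation by O(log n) binary exponentiation of the 3×3 tribonacci step matrix.

-- ===== PORT A =====
def findByTabulation (n : Int) : Int :=
  if n == 0 then 0
  else
    -- [0] * (n + 1): empty when n + 1 ≤ 0, exactly as toNat gives 0 there
    let result := List.replicate (n + 1).toNat (0 : Int)
    -- result[0] = 1 : raises IndexError when the list is empty (n < 0); Pre_ excludes that
    let result := PySem.List.pySetD result 0 1
    let result := (PySem.List.pyRange 1 (n + 1) 1).foldl (fun res i =>
      let sum := (PySem.List.pyRange 1 4 1).foldl (fun sum j =>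
        let index := i - j
        sum + (if index > -1 then PySem.List.pyGetD res index 0 else 0)) 0
      -- result[i] = sum : i ≥ 1 inside the range, in range under Pre_
      PySem.List.pySetD res i sum) result
    -- return result[n] : in range under Pre_
    PySem.List.pyGetD result n 0

-- ===== PORT B =====
-- B-side helpers: 3×3 integer matrices as a flat structure (B's tuples-of-tuples)
structure M3 where
  a : Int
  b : Int
  c : Int
  d : Int
  e : Int
  f : Int
  g : Int
  h : Int
  i : Int
deriving DecidableEq, Repr

def m3mul (X Y : M3) : M3 :=
  ⟨X.a*Y.a + X.b*Y.d + X.c*Y.g, X.a*Y.b + X.b*Y.e + X.c*Y.h, X.a*Y.c + X.b*Y.f + X.c*Y.i,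
   X.d*Y.a + X.e*Y.d + X.f*Y.g, X.d*Y.b + X.e*Y.e + X.f*Y.h, X.d*Y.c + X.e*Y.f + X.f*Y.i,
   X.g*Y.a + X.h*Y.d + X.i*Y.g, X.g*Y.b + X.h*Y.e + X.i*Y.h, X.g*Y.c + X.h*Y.f + X.i*Y.i⟩

def m3id : M3 := ⟨1,0,0,0,1,0,0,0,1⟩
def m3step : M3 := ⟨1,1,1,1,0,0,0,1,0⟩

-- the 'while e > 0' loop of Source B, with structural fuel = the initial e (e halves each
-- iteration, so e iterations are always enough; the fuel is never exhausted)
def powLoop : Nat → Nat → M3 → M3 → M3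
  | 0, _, R, _ => R
  | fuel+1, e, R, M =>
    if e = 0 then R
    else powLoop fuel (e / 2) (if e % 2 = 1 then m3mul R M else R) (m3mul M M)

def findByTabulation_alt (n : Int) : Int :=
  if n == 0 then 0
  -- while e > 0 with e = n: never runs for n < 0, exactly as toNat gives 0 there
  else (powLoop n.toNat n.toNat m3id m3step).a

-- ===== PRECONDITION & SPEC =====
-- Pre_ excludes exactly n < 0, where A raises IndexError (result[0] = 1 on the empty list)
def Pre_findByTabulation (n : Int) : Prop := 0 ≤ n
instance (n : Int) : Decidable (Pre_findByTabulation n) := by unfold Pre_findByTabulation; infer_instance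
def pvWitness_findByTabulation : Int := 5

def Spec_findByTabulation (n : Int) (out : Int) : Prop := out = findByTabulation_alt n
instance (n : Int) (out : Int) : Decidable (Spec_findByTabulation n out) := by unfold Spec_findByTabulation; infer_instance

-- ===== CLAIM (what is proved, stated in full; the proofs are below) =====
def Claim_equal_findByTabulation : Prop := ∀ (n : Int), Dom_findByTabulation n → Pre_findByTabulation n → Spec_findByTabulation n (findByTabulation n)

-- ===== LEMMAS AND PROOFS =====

-- the tribonacci sequence both programs compute (shifted: T 2 = result[0])
def T : Nat → Int
  | 0 => 0
  | 1 => 0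
  | 2 => 1
  | (k+3) => T (k+2) + T (k+1) + T k

lemma T_succ3 (k : Nat) : T (k+3) = T (k+2) + T (k+1) + T k := rfl

def m3pow (M : M3) : Nat → M3
  | 0 => m3id
  | k+1 => m3mul (m3pow M k) M

lemma m3mul_assoc (X Y Z : M3) : m3mul (m3mul X Y) Z = m3mul X (m3mul Y Z) := by
  cases X; cases Y; cases Z
  simp only [m3mul, M3.mk.injEq]
  and_intros <;> ring

lemma m3mul_id_left (X : M3) : m3mul m3id X = X := by
  cases X; simp only [m3mul, m3id, M3.mk.injEq]; and_intros <;> ring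

lemma m3mul_id_right (X : M3) : m3mul X m3id = X := by
  cases X; simp only [m3mul, m3id, M3.mk.injEq]; and_intros <;> ring

lemma m3pow_add (M : M3) (p q : Nat) : m3pow M (p + q) = m3mul (m3pow M p) (m3pow M q) := by
  induction q with
  | zero => simp [m3pow, m3mul_id_right]
  | succ q ih => rw [← Nat.add_assoc, m3pow, m3pow, ih, m3mul_assoc]

lemma m3pow_sq (M : M3) (k : Nat) : m3pow (m3mul M M) k = m3pow M (2 * k) := by
  induction k with
  | zero => rfl
  | succ k ih =>
    rw [m3pow, ih, Nat.mul_add, Nat.mul_one, m3pow_add]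
    congr 1
    show m3mul M M = m3mul (m3mul m3id M) M
    rw [m3mul_id_left]

lemma m3pow_mul_comm (M : M3) (k : Nat) : m3mul M (m3pow M k) = m3mul (m3pow M k) M := by
  induction k with
  | zero => rw [m3pow, m3mul_id_left, m3mul_id_right]
  | succ k ihk => rw [m3pow, ← m3mul_assoc, ihk]

lemma powLoop_eq (fuel : Nat) : ∀ (e : Nat), e ≤ fuel → ∀ (R M : M3),
    powLoop fuel e R M = m3mul R (m3pow M e) := by
  induction fuel with
  | zero =>
    intro e he R M
    obtain rfl : e = 0 := Nat.le_zero.mp he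
    rw [powLoop, m3pow, m3mul_id_right]
  | succ fuel ih =>
    intro e he R M
    rw [powLoop]
    by_cases h : e = 0
    · subst h; simp [m3pow, m3mul_id_right]
    · have hdiv : e / 2 ≤ fuel := by
        have := Nat.div_lt_self (Nat.pos_of_ne_zero h) (Nat.one_lt_two)
        omega
      rw [if_neg h, ih (e / 2) hdiv, m3pow_sq]
      by_cases hp : e % 2 = 1
      · rw [if_pos hp, m3mul_assoc, m3pow_mul_comm,
          show m3mul (m3pow M (2 * (e / 2))) M = m3pow M (2 * (e / 2) + 1) from rfl]
        congr 2
        omega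
      · rw [if_neg hp]
        congr 2
        omega

lemma m3pow_step_row (k : Nat) :
    (m3pow m3step k).a = T (k+2) ∧ (m3pow m3step k).b = T (k+1) + T k ∧ (m3pow m3step k).c = T (k+1) := by
  induction k with
  | zero => refine ⟨rfl, ?_, rfl⟩; simp [m3pow, m3id, T]
  | succ k ih =>
    obtain ⟨ha, hb, hc⟩ := ih
    have hstep : m3pow m3step (k+1) = m3mul (m3pow m3step k) m3step := rfl
    rw [hstep]
    simp only [m3mul, ha, hb, hc]
    refine ⟨?_, ?_, ?_⟩ <;> simp only [m3step] <;>
      [rw [show k+1+2 = k+3 from rfl, T_succ3]; skip; skip] <;> ring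

lemma alt_pos (n : Int) (hn : 0 < n) : findByTabulation_alt n = T (n.toNat + 2) := by
  have h0 : (n == 0) = false := by simp; omega
  rw [findByTabulation_alt, h0]
  simp only [Bool.false_eq_true, if_false]
  rw [powLoop_eq n.toNat n.toNat (Nat.le_refl _), m3mul_id_left]
  exact (m3pow_step_row n.toNat).1

-- getD after set, in one conditional (specific glue for the table updates)
lemma getD_set_ite (L : List Int) (i k : Nat) (hi : i < L.length) (v : Int) :
    (L.set i v).getD k 0 = if k = i then v else L.getD k 0 := by
  simp only [List.getD_eq_getElem?_getD, List.getElem?_set]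
  split
  · rename_i hh; simp [← hh]
  · rename_i hh; rw [if_neg (by omega)]

-- the table A builds: after processing range(1, m+1), it has length N+1 and entry k is
-- T (k+2) for k ≤ m, 0 beyond
lemma loopA_inv (N : Nat) (m : Nat) (hm : m ≤ N) :
    (((PySem.List.pyRange 1 ((m : Int) + 1) 1).foldl (fun res i =>
          let sum := (PySem.List.pyRange 1 4 1).foldl (fun sum j =>
            let index := i - j
            sum + (if index > -1 then PySem.List.pyGetD res index 0 else 0)) 0
          PySem.List.pySetD res i sum)
          (PySem.List.pySetD (List.replicate (N+1) (0 : Int)) 0 1)).length = N + 1)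
    ∧ ∀ k : Nat,
      ((PySem.List.pyRange 1 ((m : Int) + 1) 1).foldl (fun res i =>
          let sum := (PySem.List.pyRange 1 4 1).foldl (fun sum j =>
            let index := i - j
            sum + (if index > -1 then PySem.List.pyGetD res index 0 else 0)) 0
          PySem.List.pySetD res i sum)
          (PySem.List.pySetD (List.replicate (N+1) (0 : Int)) 0 1)).getD k 0
      = if k ≤ m then T (k+2) else 0 := by
  induction m with
  | zero =>
    rw [show ((0:Nat):Int) + 1 = 1 from by norm_num,
      PySem.List.pyRange_one_eq_nil (le_refl 1), List.foldl_nil,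
      PySem.List.pySetD_of_nonneg _ _ (by norm_num)]
    refine ⟨by simp, fun k => ?_⟩
    by_cases hk : k = 0
    · subst hk; simp [List.getD_eq_getElem?_getD]; rfl
    · rw [if_neg (by omega)]
      simp [List.getD_eq_getElem?_getD, (Ne.symm hk), List.getElem?_replicate]
      split <;> rfl
  | succ m ih =>
    obtain ⟨ihlen, ihget⟩ := ih (by omega)
    rw [show (((m+1:Nat)):Int) + 1 = ((m : Int) + 1) + 1 from by push_cast; ring,
      PySem.List.pyRange_one_succ_right (by omega), List.foldl_append, List.foldl_cons,
      List.foldl_nil]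
    revert ihlen ihget
    generalize ((PySem.List.pyRange 1 ((m : Int) + 1) 1).foldl (fun res i =>
          let sum := (PySem.List.pyRange 1 4 1).foldl (fun sum j =>
            let index := i - j
            sum + (if index > -1 then PySem.List.pyGetD res index 0 else 0)) 0
          PySem.List.pySetD res i sum)
          (PySem.List.pySetD (List.replicate (N+1) (0 : Int)) 0 1)) = L
    intro ihlen ihget
    simp only [show PySem.List.pyRange 1 4 1 = [1,2,3] from rfl, List.foldl_cons, List.foldl_nil]
    rw [PySem.List.pySetD_of_nonneg _ _ (by omega),
      show ((m : Int) + 1).toNat = m + 1 from by omega]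
    have hget : ∀ k : Nat, PySem.List.pyGetD L ((k:Nat):Int) 0 = if k ≤ m then T (k+2) else 0 :=
      fun k => by rw [PySem.List.pyGetD_natCast]; exact ihget k
    refine ⟨by rw [List.length_set, ihlen], fun k => ?_⟩
    rw [getD_set_ite _ _ _ (by omega) _]
    rcases m with _ | m
    · -- i = 1 reads indices 0, -1, -2
      by_cases hk : k = 0 + 1
      · rw [if_pos hk,
          show ((0:Nat):Int) + 1 - 1 = (((0:Nat)):Int) from by ring,
          if_pos (by omega), if_neg (by omega), if_neg (by omega), hget 0,
          if_pos (by omega), if_pos (by omega), hk]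
        decide
      · rw [if_neg hk, ihget k]
        by_cases hk0 : k = 0
        · rw [if_pos (by omega), if_pos (by omega)]
        · rw [if_neg (by omega), if_neg (by omega)]
    · rcases m with _ | m
      · -- i = 2 reads indices 1, 0, -1
        by_cases hk : k = 1 + 1
        · rw [show ((1:Nat):Int) + 1 - 1 = (((1:Nat)):Int) from by ring,
            show ((1:Nat):Int) + 1 - 2 = (((0:Nat)):Int) from by norm_num,
            if_pos hk,
            if_pos (by omega), if_pos (by omega), if_neg (by omega),
            hget 1, hget 0, if_pos (by omega), if_pos (by omega), if_pos (by omega), hk]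
          decide
        · rw [if_neg hk, ihget k]
          by_cases hk1 : k ≤ 1
          · rw [if_pos hk1, if_pos (by omega)]
          · rw [if_neg hk1, if_neg (by omega)]
      · -- i = m + 3 reads indices m + 2, m + 1, m
        by_cases hk : k = m + 1 + 1 + 1
        · rw [show (((m+1+1:Nat)):Int) + 1 - 1 = (((m+2:Nat)):Int) from by push_cast; ring,
            show (((m+1+1:Nat)):Int) + 1 - 2 = (((m+1:Nat)):Int) from by push_cast; ring,
            show (((m+1+1:Nat)):Int) + 1 - 3 = ((m:Nat):Int) from by push_cast; ring,
            if_pos hk,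
            if_pos (by omega), if_pos (by omega), if_pos (by omega),
            hget (m+2), hget (m+1), hget m,
            if_pos (by omega), if_pos (by omega), if_pos (by omega), if_pos (by omega), hk]
          rw [show m+1+1+1+2 = (m+2)+3 from by omega, T_succ3 (m+2),
            show m+1+2 = m+2+1 from by omega]
          ring
        · rw [if_neg hk, ihget k]
          by_cases hk2 : k ≤ m + 2
          · rw [if_pos hk2, if_pos (by omega)]
          · rw [if_neg hk2, if_neg (by omega)]

lemma a_pos (n : Int) (hn : 0 < n) : findByTabulation n = T (n.toNat + 2) := by
  have h0 : (n == 0) = false := by simp; omega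
  obtain ⟨N, hN⟩ : ∃ N : Nat, n = (N : Int) := ⟨n.toNat, by omega⟩
  subst hN
  rw [findByTabulation, h0]
  simp only [Bool.false_eq_true, if_false]
  rw [show ((N:Int) + 1).toNat = N + 1 from by omega,
    PySem.List.pyGetD_natCast]
  exact ((loopA_inv N N (le_refl N)).2 N).trans (by rw [if_pos (le_refl N)]; norm_num)

-- ===== VERDICT (by name: the statement is the Claim_ definition above) =====
theorem findByTabulation_spec : Claim_equal_findByTabulation := by
  intro n _ hpre
  unfold Spec_findByTabulation
  rcases lt_or_eq_of_le hpre with hn | hn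
  · rw [a_pos n hn, alt_pos n hn]
  · subst hn; rfl
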